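-- pv_equiv track=rewrite | github.com/anjli01/Python-Functions | 12.py | extract_unique_digits_from_tuples
-- ===== SOURCE A (Python) =====
-- from typing import Any, Dict, List, Tuple, Set, Union, Iterable, Generator
--
-- def extract_unique_digits_from_tuples(
--     data_list: List[Tuple[int, ...]]
-- ) -> List[str]:
--     """
--     Extracts all unique digits from numbers inside a list of tuples.
--
--     Args:
--         data_list: A list of tuples containing integers.
--
--     Returns:
--         A sorted list of unique digits as strings.
--     """
--     all_digits = {
--         digit
--         for tup in data_list
--         for num in tup
--         for digit in str(num)
--     }
--     return sorted(list(all_digits))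
-- ===== SOURCE B (Python) =====
-- def extract_unique_digits_from_tuples(data_list):
--     """Never converts a number to a string: extracts decimal digits
--     arithmetically (repeated divmod by 10) into a 10-bit presence bitmask,
--     tracks one flag for negative numbers, and emits '-' (if any negative)
--     followed by the present digits in ascending order."""
--     neg = False
--     digit_mask = 0
--     for tup in data_list:
--         for num in tup:
--             if num < 0:
--                 neg = True
--                 num = -num
--             while num >= 10:
--                 digit_mask |= 1 << (num % 10)
--                 num //= 10
--             digit_mask |= 1 << num
--     res = ['-'] if neg else []
--     for d in range(10):
--         if digit_mask >> d & 1: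
--             res.append(str(d))
--     return res
-- ===== Notes on version B (the rewrite author's own statement) =====
-- stated objective: alternative
-- what changed: B never calls str() on the numbers and never sorts: it extracts decimal digits arithmetically by repeated divmod into a 10-bit presence bitmask plus one negative flag, then emits '-' and the present digits in ascending order.
import Mathlib
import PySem

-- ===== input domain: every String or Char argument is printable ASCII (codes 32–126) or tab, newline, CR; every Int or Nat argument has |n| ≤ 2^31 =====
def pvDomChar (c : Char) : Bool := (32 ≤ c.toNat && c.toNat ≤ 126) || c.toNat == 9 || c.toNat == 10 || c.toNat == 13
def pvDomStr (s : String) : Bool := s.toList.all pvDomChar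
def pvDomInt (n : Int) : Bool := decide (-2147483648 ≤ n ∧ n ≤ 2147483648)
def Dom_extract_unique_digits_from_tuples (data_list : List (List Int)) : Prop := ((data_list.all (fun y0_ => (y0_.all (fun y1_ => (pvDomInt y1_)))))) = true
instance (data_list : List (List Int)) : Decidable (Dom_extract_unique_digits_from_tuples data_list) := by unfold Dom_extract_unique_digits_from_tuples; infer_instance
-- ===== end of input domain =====

-- B never converts a number to a string and never sorts: it extracts decimal digits
-- arithmetically into a 10-bit presence bitmask plus a negative flag and emits
-- '-' then the present digits in ascending order; alternative, not faster.

-- ===== PORT A =====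
def extract_unique_digits_from_tuples (data_list : List (List Int)) : List String :=
  let all_digits : PySem.Set String :=
    PySem.Set.ofList (data_list.flatMap (fun tup =>
      tup.flatMap (fun num =>
        (PySem.Int.toStr num).toList.map (fun c => String.ofList [c]))))
  PySem.List.sorted all_digits (fun x => x)

-- ===== PORT B =====
-- the 'while num >= 10' loop of Source B; num is nonnegative there (negated first), so Nat
def pvMarkDigits (num mask : Nat) : Nat :=
  if 10 ≤ num then pvMarkDigits (num / 10) (mask ||| (1 <<< (num % 10)))
  else mask ||| (1 <<< num)

def extract_unique_digits_from_tuples_alt (data_list : List (List Int)) : List String :=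
  let st : Bool × Nat :=
    data_list.foldl (fun st tup =>
      tup.foldl (fun st num =>
        (st.1 || decide (num < 0), pvMarkDigits num.natAbs st.2)) st) (false, 0)
  (if st.1 then ["-"] else []) ++
    ((List.range 10).filter (fun d => st.2 >>> d &&& 1 == 1)).map
      (fun d => PySem.Int.toStr (Int.ofNat d))

-- ===== PRECONDITION & SPEC =====
def Spec_extract_unique_digits_from_tuples (data_list : List (List Int)) (out : List String) : Prop := out = extract_unique_digits_from_tuples_alt data_list
instance (data_list : List (List Int)) (out : List String) : Decidable (Spec_extract_unique_digits_from_tuples data_list out) := by unfold Spec_extract_unique_digits_from_tuples; infer_instance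

-- ===== CLAIM (what is proved, stated in full; the proofs are below) =====
def Claim_equal_extract_unique_digits_from_tuples : Prop := ∀ (data_list : List (List Int)), Dom_extract_unique_digits_from_tuples data_list → Spec_extract_unique_digits_from_tuples data_list (extract_unique_digits_from_tuples data_list)

-- ===== LEMMAS AND PROOFS =====

-- the flat list of all numbers
def pvNums (data_list : List (List Int)) : List Int := data_list.flatMap id

theorem pv_bridge (m d : Nat) : (m >>> d &&& 1 == 1) = Nat.testBit m d := by
  simp [Nat.testBit]

theorem pv_shiftTest (j d : Nat) : ((1 <<< j) >>> d &&& 1 == 1) = decide (d = j) := by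
  rw [pv_bridge, Nat.testBit_shiftLeft]
  by_cases h : j ≤ d
  · have h1 : Nat.testBit 1 (d - j) = decide (d - j = 0) := by
      rcases Nat.eq_zero_or_pos (d - j) with h0 | h0
      · simp [h0]
      · rw [Nat.testBit_eq_decide_div_mod_eq]
        have : (1 : Nat) / 2 ^ (d - j) = 0 := Nat.div_eq_of_lt (by
          calc (1:Nat) < 2 ^ 1 := by norm_num
          _ ≤ 2 ^ (d - j) := Nat.pow_le_pow_right (by norm_num) h0)
        simp [this]; omega
    simp only [ge_iff_le, h, decide_true, Bool.true_and, h1]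
    simp; omega
  · have : ¬ (d ≥ j) := by omega
    simp only [ge_iff_le, this, decide_false, Bool.false_and]
    simp; omega

theorem pv_orTest (a b d : Nat) : ((a ||| b) >>> d &&& 1 == 1) = ((a >>> d &&& 1 == 1) || (b >>> d &&& 1 == 1)) := by
  rw [pv_bridge, pv_bridge, pv_bridge, Nat.testBit_or]

theorem pv_zeroTest (d : Nat) : ((0 : Nat) >>> d &&& 1 == 1) = false := by
  rw [pv_bridge, Nat.zero_testBit]

-- bit test of the mask as it comes out of pvMarkDigits
theorem pv_mark_or (n m : Nat) : pvMarkDigits n m = m ||| pvMarkDigits n 0 := by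
  induction n using Nat.strong_induction_on generalizing m with
  | _ n ih =>
    unfold pvMarkDigits
    split
    · rename_i h
      rw [ih (n / 10) (by omega) (m ||| (1 <<< (n % 10))),
        ih (n / 10) (by omega) (0 ||| (1 <<< (n % 10))), Nat.zero_or, Nat.or_assoc]
    · rw [Nat.zero_or]

theorem pv_mark_lt10 (n d : Nat) (hd : 10 ≤ d) : ((pvMarkDigits n 0) >>> d &&& 1 == 1) = false := by
  induction n using Nat.strong_induction_on with
  | _ n ih =>
    unfold pvMarkDigits
    split
    · rename_i h
      rw [pv_mark_or, pv_orTest, ih (n / 10) (by omega), pv_orTest, pv_zeroTest,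
        pv_shiftTest]
      have : n % 10 < 10 := Nat.mod_lt _ (by norm_num)
      simp; omega
    · rename_i h
      rw [pv_orTest, pv_zeroTest, pv_shiftTest]
      simp; omega

-- membership in Nat.toDigitsCore vs bits of pvMarkDigits
theorem pv_digits_chars (n : Nat) : ∀ (fuel : Nat) (acc : List Char) (c : Char), n < fuel →
    (c ∈ Nat.toDigitsCore 10 fuel n acc ↔
      c ∈ acc ∨ ∃ d, ((pvMarkDigits n 0) >>> d &&& 1 == 1) = true ∧ c = Nat.digitChar d) := by
  induction n using Nat.strong_induction_on with
  | _ n ih =>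
    intro fuel acc c hfuel
    obtain ⟨f, rfl⟩ : ∃ f, fuel = f + 1 := ⟨fuel - 1, by omega⟩
    simp only [Nat.toDigitsCore]
    by_cases h10 : 10 ≤ n
    · have hne : n / 10 ≠ 0 := by omega
      have hrec : n / 10 < n := Nat.div_lt_self (by omega) (by norm_num)
      rw [if_neg hne]
      rw [ih (n / 10) hrec f _ c (by omega)]
      have hmask : pvMarkDigits n 0 = (1 <<< (n % 10)) ||| pvMarkDigits (n / 10) 0 := by
        conv_lhs => unfold pvMarkDigits
        rw [if_pos h10, pv_mark_or, Nat.zero_or]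
      constructor
      · rintro (hc | ⟨d, hd, rfl⟩)
        · rcases List.mem_cons.mp hc with rfl | hc
          · exact Or.inr ⟨n % 10, by rw [hmask, pv_orTest, pv_shiftTest]; simp, rfl⟩
          · exact Or.inl hc
        · exact Or.inr ⟨d, by rw [hmask, pv_orTest, hd]; simp, rfl⟩
      · rintro (hc | ⟨d, hd, rfl⟩)
        · exact Or.inl (List.mem_cons_of_mem _ hc)
        · rw [hmask, pv_orTest, pv_shiftTest] at hd
          rcases Bool.or_eq_true_iff.mp hd with hd | hd
          · have hdn : d = n % 10 := by simpa using hd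
            subst hdn
            exact Or.inl List.mem_cons_self
          · exact Or.inr ⟨d, hd, rfl⟩
    · have h0 : n / 10 = 0 := by omega
      rw [h0, if_pos rfl]
      have hmask : pvMarkDigits n 0 = 1 <<< n := by
        unfold pvMarkDigits; rw [if_neg h10, Nat.zero_or]
      have hmod : n % 10 = n := Nat.mod_eq_of_lt (by omega)
      rw [List.mem_cons, hmod, hmask]
      constructor
      · rintro (rfl | hc)
        · exact Or.inr ⟨n, by rw [pv_shiftTest]; simp, rfl⟩
        · exact Or.inl hc
      · rintro (hc | ⟨d, hd, rfl⟩)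
        · exact Or.inr hc
        · rw [pv_shiftTest] at hd
          simp at hd; subst hd; exact Or.inl rfl

-- membership in str(num) vs the per-number flag/mask
theorem pv_toChars_iff (num : Int) (c : Char) :
    c ∈ (PySem.Int.toStr num).toList ↔
      (num < 0 ∧ c = '-') ∨
      ∃ d, ((pvMarkDigits num.natAbs 0) >>> d &&& 1 == 1) = true ∧ c = Nat.digitChar d := by
  rw [PySem.Int.toList_toStr]
  unfold PySem.Int.toChars Nat.toDigits
  split
  · rename_i h
    rw [List.mem_cons, pv_digits_chars num.natAbs (num.natAbs + 1) [] c (by omega)]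
    simp only [List.not_mem_nil, false_or]
    constructor
    · rintro (rfl | hc)
      · exact Or.inl ⟨h, rfl⟩
      · exact Or.inr hc
    · rintro (⟨_, rfl⟩ | hc)
      · exact Or.inl rfl
      · exact Or.inr hc
  · rename_i h
    have hnum : num.toNat = num.natAbs := by omega
    rw [hnum, pv_digits_chars num.natAbs (num.natAbs + 1) [] c (by omega)]
    simp only [List.not_mem_nil, false_or]
    constructor
    · exact Or.inr
    · rintro (⟨h', _⟩ | hc)
      · exact absurd h' h
      · exact hc

-- the two nested foldl's of B reduce to a foldl over the flattened numbers
theorem pv_fold_flat (d : List (List Int)) (st : Bool × Nat) :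
    d.foldl (fun st tup =>
      tup.foldl (fun st num =>
        (st.1 || decide (num < 0), pvMarkDigits num.natAbs st.2)) st) st
    = (pvNums d).foldl (fun st num =>
        (st.1 || decide (num < 0), pvMarkDigits num.natAbs st.2)) st := by
  induction d generalizing st with
  | nil => rfl
  | cons t rest ih =>
    rw [List.foldl_cons, ih]
    simp [pvNums, List.foldl_append]

theorem pv_fold_neg (l : List Int) (st : Bool × Nat) :
    (l.foldl (fun st num =>
      (st.1 || decide (num < 0), pvMarkDigits num.natAbs st.2)) st).1
    = (st.1 || l.any (fun num => decide (num < 0))) := by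
  induction l generalizing st with
  | nil => simp
  | cons x l ih => rw [List.foldl_cons, ih]; simp [Bool.or_assoc]

theorem pv_fold_mask (l : List Int) (st : Bool × Nat) (d : Nat) :
    ((l.foldl (fun st num =>
      (st.1 || decide (num < 0), pvMarkDigits num.natAbs st.2)) st).2 >>> d &&& 1 == 1)
    = ((st.2 >>> d &&& 1 == 1) ||
        l.any (fun num => (pvMarkDigits num.natAbs 0) >>> d &&& 1 == 1)) := by
  induction l generalizing st with
  | nil => simp
  | cons x l ih =>
    rw [List.foldl_cons, ih]
    simp only [List.any_cons]
    rw [pv_mark_or, pv_orTest, Bool.or_assoc]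

theorem pv_digitChar_toNat (d : Nat) (h : d < 10) : (Nat.digitChar d).toNat = 48 + d := by
  interval_cases d <;> decide

theorem pv_single_lt (a b : Char) (h : a.toNat < b.toNat) :
    String.ofList [a] < String.ofList [b] := by
  have hab : a < b := Char.lt_def.mpr (by exact_mod_cast h)
  simp only [String.lt_iff_toList_lt, String.toList_ofList]
  exact List.Lex.rel hab

theorem pv_toStr_digit (d : Nat) (h : d < 10) :
    PySem.Int.toStr (Int.ofNat d) = String.ofList [Nat.digitChar d] := by
  interval_cases d <;> decide

-- main equality
theorem pv_main (dl : List (List Int)) :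
    extract_unique_digits_from_tuples dl = extract_unique_digits_from_tuples_alt dl := by
  unfold extract_unique_digits_from_tuples extract_unique_digits_from_tuples_alt
  simp only []
  rw [pv_fold_flat]
  set step := fun (st : Bool × Nat) (num : Int) =>
    (st.1 || decide (num < 0), pvMarkDigits num.natAbs st.2) with hstep
  set st := (pvNums dl).foldl step (false, 0) with hst
  have hneg : st.1 = (pvNums dl).any (fun num => decide (num < 0)) := by
    rw [hst, pv_fold_neg]; simp
  have hmask : ∀ d : Nat, (st.2 >>> d &&& 1 == 1)
      = (pvNums dl).any (fun num => (pvMarkDigits num.natAbs 0) >>> d &&& 1 == 1) := by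
    intro d; rw [hst, pv_fold_mask, pv_zeroTest, Bool.false_or]
  -- the B-side output list
  set out := (if st.1 then ["-"] else []) ++
    ((List.range 10).filter (fun d => st.2 >>> d &&& 1 == 1)).map
      (fun d => PySem.Int.toStr (Int.ofNat d)) with hout
  -- out is strictly increasing
  have hmap : ((List.range 10).filter (fun d => st.2 >>> d &&& 1 == 1)).map
      (fun d => PySem.Int.toStr (Int.ofNat d))
      = ((List.range 10).filter (fun d => st.2 >>> d &&& 1 == 1)).map
        (fun d => String.ofList [Nat.digitChar d]) := by
    apply List.map_congr_left
    intro d hd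
    exact pv_toStr_digit d (List.mem_range.mp (List.mem_of_mem_filter hd))
  have hpairfilter : ((List.range 10).filter (fun d => st.2 >>> d &&& 1 == 1)).Pairwise (· < ·) :=
    List.pairwise_lt_range.filter _
  have hpairdig : (((List.range 10).filter (fun d => st.2 >>> d &&& 1 == 1)).map
      (fun d => String.ofList [Nat.digitChar d])).Pairwise (fun a b => a < b) := by
    refine List.pairwise_map.mpr (hpairfilter.imp_of_mem ?_)
    intro i j hi hj hij
    have hi' : i < 10 := List.mem_range.mp (List.mem_of_mem_filter hi)
    have hj' : j < 10 := List.mem_range.mp (List.mem_of_mem_filter hj)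
    exact pv_single_lt _ _ (by rw [pv_digitChar_toNat i hi', pv_digitChar_toNat j hj']; omega)
  have hpair : out.Pairwise (fun a b => a < b) := by
    rw [hout, hmap]
    rcases hb : st.1 with _ | _
    · simpa using hpairdig
    · refine List.pairwise_cons.mpr ⟨?_, hpairdig⟩
      intro s hs
      obtain ⟨d, hd, rfl⟩ := List.mem_map.mp hs
      have hd' : d < 10 := List.mem_range.mp (List.mem_of_mem_filter hd)
      have : ("-" : String) = String.ofList ['-'] := rfl
      rw [this]
      refine pv_single_lt _ _ ?_
      rw [pv_digitChar_toNat d hd']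
      have h45 : ('-').toNat = 45 := rfl
      omega
  have hnodup : out.Nodup := hpair.imp (fun h => ne_of_lt h)
  -- same membership as A's set
  have hmem : ∀ s : String,
      s ∈ out ↔ s ∈ PySem.Set.ofList (dl.flatMap (fun tup =>
        tup.flatMap (fun num =>
          (PySem.Int.toStr num).toList.map (fun c => String.ofList [c])))) := by
    intro s
    rw [PySem.Set.mem_ofList, hout, hmap, List.mem_append]
    simp only [List.mem_map, List.mem_filter, List.mem_range, List.mem_flatMap]
    constructor
    · rintro (hs | ⟨d, ⟨hd10, hdbit⟩, rfl⟩)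
      · -- s = "-" and some num is negative
        have hb : st.1 = true := by
          rcases h : st.1 with _ | _
          · rw [h] at hs; simp at hs
          · rfl
        rw [hb] at hs; simp at hs
        have hany : ((pvNums dl).any fun num => decide (num < 0)) = true := by
          rw [← hneg]; exact hb
        obtain ⟨num, hnum, hneg'⟩ := List.any_eq_true.mp hany
        simp only [pvNums, List.mem_flatMap, id] at hnum
        obtain ⟨tup, htup, hmemnum⟩ := hnum
        refine ⟨tup, htup, num, hmemnum, ?_⟩
        refine ⟨'-', ?_, by rw [hs]⟩
        rw [pv_toChars_iff]
        exact Or.inl ⟨by simpa using hneg', rfl⟩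
      · rw [hmask] at hdbit
        obtain ⟨num, hnum, hbit⟩ := List.any_eq_true.mp hdbit
        simp only [pvNums, List.mem_flatMap, id] at hnum
        obtain ⟨tup, htup, hmemnum⟩ := hnum
        refine ⟨tup, htup, num, hmemnum, Nat.digitChar d, ?_, rfl⟩
        rw [pv_toChars_iff]
        exact Or.inr ⟨d, hbit, rfl⟩
    · rintro ⟨tup, htup, num, hnum, c, hc, rfl⟩
      have hnum' : num ∈ pvNums dl := by
        simp only [pvNums, List.mem_flatMap, id]; exact ⟨tup, htup, hnum⟩
      rw [pv_toChars_iff] at hc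
      rcases hc with ⟨hlt, rfl⟩ | ⟨d, hbit, rfl⟩
      · left
        have : st.1 = true := by
          rw [hneg]; exact List.any_eq_true.mpr ⟨num, hnum', by simpa using hlt⟩
        rw [this]; simp
      · right
        have hd10 : d < 10 := by
          by_contra h
          rw [pv_mark_lt10 num.natAbs d (by omega)] at hbit
          exact Bool.false_ne_true hbit
        refine ⟨d, ⟨hd10, ?_⟩, rfl⟩
        rw [hmask]
        exact List.any_eq_true.mpr ⟨num, hnum', hbit⟩
  refine (PySem.List.sorted_eq_of_perm_of_pairwise_lt _ _ _ ?_ hpair).symm ▸ rfl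
  exact (List.perm_ext_iff_of_nodup hnodup (PySem.Set.nodup_ofList _)).mpr hmem

-- ===== VERDICT (by name: the statement is the Claim_ definition above) =====
theorem extract_unique_digits_from_tuples_spec : Claim_equal_extract_unique_digits_from_tuples := by
  intro dl _hd
  unfold Spec_extract_unique_digits_from_tuples
  exact pv_main dl
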